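-- pv_equiv track=rewrite | github.com/Pratinav-Shrivastava/codeforces | Random/A_Only_Pluses.py | banana
-- ===== SOURCE A (Python) =====
-- def banana(a, b, c):
--     for i in range(5):
--         least = min(a, b, c)
--         if a == least:
--             a += 1
--         elif b == least:
--             b += 1
--         elif c == least:
--             c += 1
--     return a*b*c
-- ===== SOURCE B (Python) =====
-- def banana(a, b, c):
--     # water-filling: compute the distribution of the 5 increments in closed
--     # form instead of handing them out one at a time.
--     x, y, z = sorted((a, b, c))
--     k = 5
--     t = min(k, y - x)          # lift the minimum toward the middle
--     x += t
--     k -= t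
--     t = min(k // 2, z - x)     # lift the tied pair toward the maximum
--     x += t
--     y += t
--     k -= 2 * t
--     if x < z:
--         x += k                 # at most one leftover unit
--     else:
--         q, r = divmod(k, 3)    # all three tied: split the rest evenly
--         x += q
--         y += q
--         z += q
--         x += 1 if r >= 1 else 0
--         y += 1 if r >= 2 else 0
--     return x * y * z
-- ===== Notes on version B (the rewrite author's own statement) =====
-- stated objective: alternative
-- what changed: B replaces A's five-iteration loop that rescans for the minimum and hands out one increment at a time by a closed-form water-filling computation: it sorts the triple once and computes arithmetically how the 5 units distribute (lift min to mid, lift the tied pair toward the max with //2, split the remainder with divmod by 3), with no per-unit loop.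
import Mathlib
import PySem

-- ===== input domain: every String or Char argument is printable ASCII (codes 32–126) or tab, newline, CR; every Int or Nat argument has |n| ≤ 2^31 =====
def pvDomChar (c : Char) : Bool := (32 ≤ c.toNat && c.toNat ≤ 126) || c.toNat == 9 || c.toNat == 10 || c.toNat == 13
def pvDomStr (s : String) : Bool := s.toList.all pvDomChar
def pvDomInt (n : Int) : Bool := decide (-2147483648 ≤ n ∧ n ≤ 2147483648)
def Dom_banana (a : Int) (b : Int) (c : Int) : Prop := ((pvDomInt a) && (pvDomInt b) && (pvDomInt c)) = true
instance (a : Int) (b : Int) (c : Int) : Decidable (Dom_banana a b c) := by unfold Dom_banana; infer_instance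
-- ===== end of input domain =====

-- B replaces A's five single-increment iterations by a closed-form water-filling distribution of the 5 units (sort once, then pure arithmetic).


-- ===== PORT A =====
-- one iteration of A's loop body: least = min(a,b,c); if a == least: a += 1; elif …
def bananaStep (t : Int × Int × Int) : Int × Int × Int :=
  let least := min t.1 (min t.2.1 t.2.2)
  if t.1 = least then (t.1 + 1, t.2.1, t.2.2)
  else if t.2.1 = least then (t.1, t.2.1 + 1, t.2.2)
  else if t.2.2 = least then (t.1, t.2.1, t.2.2 + 1)
  else t

def banana (a : Int) (b : Int) (c : Int) : Int :=
  let t := (PySem.List.pyRange 0 5 1).foldl (fun t _ => bananaStep t) (a, b, c)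
  t.1 * t.2.1 * t.2.2

-- ===== PORT B =====
-- port of Python's sorted() on a 3-tuple of ints (stability is moot on equal ints)
def sort3 (a : Int) (b : Int) (c : Int) : Int × Int × Int :=
  if a ≤ b then
    if b ≤ c then (a, b, c) else if a ≤ c then (a, c, b) else (c, a, b)
  else
    if a ≤ c then (b, a, c) else if b ≤ c then (b, c, a) else (c, b, a)

def banana_alt (a : Int) (b : Int) (c : Int) : Int :=
  let s := sort3 a b c
  let x := s.1
  let y := s.2.1
  let z := s.2.2
  let k : Int := 5
  let t := min k (y - x)                          -- lift the minimum toward the middle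
  let x := x + t
  let k := k - t
  let t := min (PySem.Int.floordiv k 2) (z - x)   -- lift the tied pair toward the maximum
  let x := x + t
  let y := y + t
  let k := k - 2 * t
  let w : Int × Int × Int :=
    if x < z then (x + k, y, z)                   -- at most one leftover unit
    else
      let q := PySem.Int.floordiv k 3             -- all three tied: split the rest evenly
      let r := PySem.Int.mod k 3
      (x + q + (if 1 ≤ r then 1 else 0), y + q + (if 2 ≤ r then 1 else 0), z + q)
  w.1 * w.2.1 * w.2.2

-- ===== PRECONDITION & SPEC =====
def Spec_banana (a : Int) (b : Int) (c : Int) (out : Int) : Prop := out = banana_alt a b c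
instance (a : Int) (b : Int) (c : Int) (out : Int) : Decidable (Spec_banana a b c out) := by unfold Spec_banana; infer_instance

-- ===== CLAIM (what is proved, stated in full; the proofs are below) =====
def Claim_equal_banana : Prop := ∀ (a : Int) (b : Int) (c : Int), Dom_banana a b c → Spec_banana a b c (banana a b c)

-- ===== LEMMAS AND PROOFS =====

def prod3 (t : Int × Int × Int) : Int := t.1 * t.2.1 * t.2.2

def sort3' (t : Int × Int × Int) : Int × Int × Int := sort3 t.1 t.2.1 t.2.2

def Sorted3 (t : Int × Int × Int) : Prop := t.1 ≤ t.2.1 ∧ t.2.1 ≤ t.2.2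

-- the final triple B computes, as a function of the sorted components
def bTriple (x : Int) (y : Int) (z : Int) : Int × Int × Int :=
  let k : Int := 5
  let t := min k (y - x)
  let x := x + t
  let k := k - t
  let t := min (PySem.Int.floordiv k 2) (z - x)
  let x := x + t
  let y := y + t
  let k := k - 2 * t
  if x < z then (x + k, y, z)
  else
    let q := PySem.Int.floordiv k 3
    let r := PySem.Int.mod k 3
    (x + q + (if 1 ≤ r then 1 else 0), y + q + (if 2 ≤ r then 1 else 0), z + q)

-- one step of A's loop on a sorted state: increment a minimal element, keep sorted
def sstep (s : Int × Int × Int) : Int × Int × Int :=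
  if s.1 + 1 ≤ s.2.1 then (s.1 + 1, s.2.1, s.2.2)
  else if s.1 + 1 ≤ s.2.2 then (s.2.1, s.1 + 1, s.2.2)
  else (s.2.1, s.2.2, s.1 + 1)

set_option maxHeartbeats 1000000 in
-- sorting commutes with one step of A: sorting A's state after a step = re-sorting the incremented sorted state
theorem sort3_step (t : Int × Int × Int) :
    sort3' (bananaStep t) = sort3 ((sort3' t).1 + 1) ((sort3' t).2.1) ((sort3' t).2.2) := by
  obtain ⟨a, b, c⟩ := t
  simp only [sort3', bananaStep, sort3, min_def]
  split_ifs <;> (try dsimp only at *) <;> (try simp only [Prod.mk.injEq, and_true, true_and]) <;> omega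

-- the product is invariant under sort3
theorem sort3_prod (t : Int × Int × Int) :
    prod3 (sort3' t) = prod3 t := by
  obtain ⟨a, b, c⟩ := t
  simp only [sort3', sort3, prod3]
  split_ifs <;> ring

theorem sort3_sorted (a b c : Int) : Sorted3 (sort3 a b c) := by
  simp only [sort3, Sorted3]
  split_ifs <;> simp <;> omega

theorem gstep_eq_sstep (s : Int × Int × Int) (h : Sorted3 s) :
    sort3 (s.1 + 1) s.2.1 s.2.2 = sstep s := by
  obtain ⟨x, y, z⟩ := s
  obtain ⟨h1, h2⟩ := h
  simp only [sort3, sstep]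
  dsimp only at *
  split_ifs <;> (try simp only [Prod.mk.injEq]) <;> omega

theorem sstep_sorted (s : Int × Int × Int) (h : Sorted3 s) : Sorted3 (sstep s) := by
  obtain ⟨x, y, z⟩ := s
  obtain ⟨h1, h2⟩ := h
  simp only [sstep, Sorted3]
  dsimp only at *
  split_ifs <;> dsimp only <;> exact ⟨by omega, by omega⟩

-- the canonical (sorted) triple after distributing n units by single increments to the minimum
def fillN (n : Int) (x : Int) (y : Int) (z : Int) : Int × Int × Int :=
  if n ≤ y - x then (x + n, y, z)
  else
    let k := n - (y - x)
    if k ≤ 2 * (z - y) then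
      (y + k / 2, y + k / 2 + k % 2, z)
    else
      let m := k - 2 * (z - y)
      (z + m / 3, z + m / 3 + (if 2 ≤ m % 3 then 1 else 0), z + m / 3 + (if 1 ≤ m % 3 then 1 else 0))

theorem fillN_zero (x y z : Int) (hxy : x ≤ y) : fillN 0 x y z = (x, y, z) := by
  simp only [fillN]
  split_ifs <;> (try simp only [Prod.mk.injEq, and_true, true_and]) <;> omega

set_option maxHeartbeats 1000000 in
-- one more single increment advances the canonical fill by one unit
theorem fillN_step (n x y z : Int) (hn : 0 ≤ n) (hxy : x ≤ y) (hyz : y ≤ z) :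
    sstep (fillN n x y z) = fillN (n + 1) x y z := by
  simp only [fillN, sstep]
  split_ifs <;> (try dsimp only at *) <;> (try simp only [Prod.mk.injEq, and_true, true_and]) <;> omega

set_option maxHeartbeats 4000000 in
-- B's closed-form triple, re-sorted, is the canonical fill of the 5 units
theorem bTriple_eq_fill (x y z : Int) (hxy : x ≤ y) (hyz : y ≤ z) :
    sort3' (bTriple x y z) = fillN 5 x y z := by
  have fd2 : ∀ a : Int, PySem.Int.floordiv a 2 = a / 2 :=
    fun a => PySem.Int.floordiv_eq_ediv_of_pos (by norm_num)
  have fd3 : ∀ a : Int, PySem.Int.floordiv a 3 = a / 3 :=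
    fun a => PySem.Int.floordiv_eq_ediv_of_pos (by norm_num)
  have md3 : ∀ a : Int, PySem.Int.mod a 3 = a % 3 :=
    fun a => PySem.Int.mod_eq_emod_of_pos (by norm_num)
  simp only [bTriple, fd2, fd3, md3, min_def]
  simp only [sort3', sort3, fillN]
  split_ifs <;> (try dsimp only at *) <;> (try simp only [Prod.mk.injEq, and_true, true_and]) <;> omega

-- five single-increment steps on a sorted triple reach the canonical fill
theorem sstep_eq_fill (s : Int × Int × Int) (h : Sorted3 s) :
    sstep (sstep (sstep (sstep (sstep s)))) = fillN 5 s.1 s.2.1 s.2.2 := by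
  obtain ⟨x, y, z⟩ := s
  obtain ⟨h1, h2⟩ := h
  dsimp only at *
  rw [show ((x, y, z) : Int × Int × Int) = fillN 0 x y z from (fillN_zero x y z h1).symm]
  rw [fillN_step 0 x y z (by norm_num) h1 h2, show (0 : Int) + 1 = 1 from by norm_num]
  rw [fillN_step 1 x y z (by norm_num) h1 h2, show (1 : Int) + 1 = 2 from by norm_num]
  rw [fillN_step 2 x y z (by norm_num) h1 h2, show (2 : Int) + 1 = 3 from by norm_num]
  rw [fillN_step 3 x y z (by norm_num) h1 h2, show (3 : Int) + 1 = 4 from by norm_num]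
  rw [fillN_step 4 x y z (by norm_num) h1 h2, show (4 : Int) + 1 = 5 from by norm_num]

-- ===== VERDICT (by name: the statement is the Claim_ definition above) =====
theorem banana_spec : Claim_equal_banana := by
  intro a b c _
  show banana a b c = banana_alt a b c
  have hr : PySem.List.pyRange 0 5 1 = [0, 1, 2, 3, 4] := by decide
  have hb : banana a b c
      = prod3 (bananaStep (bananaStep (bananaStep (bananaStep (bananaStep (a, b, c)))))) := by
    simp only [banana, hr, List.foldl, prod3]
  have halt : banana_alt a b c
      = prod3 (bTriple (sort3 a b c).1 (sort3 a b c).2.1 (sort3 a b c).2.2) := rfl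
  have h0 : Sorted3 (sort3 a b c) := sort3_sorted a b c
  have h1 := sstep_sorted _ h0
  have h2 := sstep_sorted _ h1
  have h3 := sstep_sorted _ h2
  have h4 := sstep_sorted _ h3
  have e0 : sort3' (a, b, c) = sort3 a b c := rfl
  rw [hb, ← sort3_prod, halt,
      ← sort3_prod (bTriple (sort3 a b c).1 (sort3 a b c).2.1 (sort3 a b c).2.2)]
  congr 1
  rw [sort3_step, sort3_step, sort3_step, sort3_step, sort3_step, e0]
  rw [gstep_eq_sstep _ h0, gstep_eq_sstep _ h1, gstep_eq_sstep _ h2,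
      gstep_eq_sstep _ h3, gstep_eq_sstep _ h4]
  rw [sstep_eq_fill _ h0, bTriple_eq_fill _ _ _ h0.1 h0.2]
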